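-- pv_equiv track=rewrite | github.com/lazyCodes7/DSA | 30-Days-Of-DSA/Day14/mar.py | findNextSmaller
-- ===== SOURCE A (Python) =====
-- def findNextSmaller(arr):
--     left_res = {}
--     right_res = {}
--     stack = []
--     left_res[0] = 0
--     stack.append(0)
--     for i in range(1,len(arr)):
--         while(stack!=[] and arr[stack[-1]] >= arr[i]):
--             idx = stack.pop()
--             right_res[idx] = i-1
--
--         if(stack == []):
--             left_res[i] = 0
--             stack.append(i)
--         else:
--             left_res[i] = stack[-1]+1
--             stack.append(i)
--
--     while(stack != []):
--         idx = stack.pop()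
--         right_res[idx] = len(arr)-1
--     return left_res, right_res
-- ===== SOURCE B (Python) =====
-- def findNextSmaller(arr):
--     n = len(arr)
--     # Pass 1 (forward): previous strictly-smaller boundary for each index.
--     left_res = {}
--     stack = []
--     for i in range(n):
--         while stack and arr[stack[-1]] >= arr[i]:
--             stack.pop()
--         left_res[i] = stack[-1] + 1 if stack else 0
--         stack.append(i)
--     # Pass 2 (forward): next <=-or-smaller boundary, assigned when popped.
--     right_res = {}
--     stack = []
--     for i in range(n):
--         while stack and arr[stack[-1]] >= arr[i]:
--             right_res[stack.pop()] = i - 1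
--         stack.append(i)
--     while stack:
--         right_res[stack.pop()] = n - 1
--     return left_res, right_res
-- ===== Notes on version B (the rewrite author's own statement) =====
-- stated objective: alternative
-- what changed: A computes both boundary dicts in one interleaved monotonic-stack loop (with a special pre-seeded index 0); B makes two independent forward stack passes, one building left_res and one building right_res, with no special-casing of index 0.
-- intended difference: On the empty list A returns ({0: 0}, {0: -1}) because it unconditionally seeds index 0 before checking the length, while B returns ({}, {}), the intended answer since an empty array has no element 0. — e.g. on findNextSmaller([]): A returns ([(0, 0)], [(0, -1)]), B returns ([], [])
import Mathlib
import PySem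

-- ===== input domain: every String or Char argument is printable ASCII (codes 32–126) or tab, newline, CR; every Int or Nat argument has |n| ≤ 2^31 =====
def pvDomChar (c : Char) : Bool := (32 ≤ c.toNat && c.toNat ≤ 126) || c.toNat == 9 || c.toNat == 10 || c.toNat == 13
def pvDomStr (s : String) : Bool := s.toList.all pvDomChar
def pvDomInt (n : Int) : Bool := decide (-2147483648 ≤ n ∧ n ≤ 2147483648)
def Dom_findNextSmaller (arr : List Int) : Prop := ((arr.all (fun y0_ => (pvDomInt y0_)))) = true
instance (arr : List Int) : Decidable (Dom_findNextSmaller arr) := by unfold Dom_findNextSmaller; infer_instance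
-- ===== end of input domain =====

-- B makes two independent forward monotonic-stack passes (left boundaries, then right
-- boundaries) instead of A's single interleaved loop with a pre-seeded index 0; on the
-- empty list B returns ({}, {}) where A returns its phantom ({0:0}, {0:-1}) entry (D_ below).

-- ===== PORT A =====
-- inner while loop: pop while arr[stack[-1]] >= arr[i], recording right_res[idx] = i-1.
-- All indices on the stack were pushed from range(len(arr)), so pyGetD's default 0 is never used.
def fnsPopA (arr : List Int) (i : Int) : List Int → PySem.Dict Int Int → List Int × PySem.Dict Int Int
  | [], right => ([], right)
  | t :: rest, right =>
    if PySem.List.pyGetD arr t 0 ≥ PySem.List.pyGetD arr i 0 then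
      fnsPopA arr i rest (right.insert t (i - 1))
    else (t :: rest, right)

-- one iteration of A's for-loop body over state (left_res, right_res, stack)
def fnsStepA (arr : List Int)
    (st : PySem.Dict Int Int × PySem.Dict Int Int × List Int) (i : Int) :
    PySem.Dict Int Int × PySem.Dict Int Int × List Int :=
  match st with
  | (left, right, stack) =>
    match fnsPopA arr i stack right with
    | ([], right) => (left.insert i 0, right, [i])
    | (t :: rest, right) => (left.insert i (t + 1), right, i :: t :: rest)

def findNextSmaller (arr : List Int) : (List (Int × Int)) × (List (Int × Int)) :=
  let init : PySem.Dict Int Int × PySem.Dict Int Int × List Int :=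
    ((PySem.Dict.empty.insert 0 0), PySem.Dict.empty, [0])
  match (PySem.List.pyRange 1 (arr.length : Int) 1).foldl (fnsStepA arr) init with
  | (left, right, stack) =>
    let right := stack.foldl (fun r idx => r.insert idx ((arr.length : Int) - 1)) right
    (left.items, right.items)

-- ===== PORT B =====
-- pass-1 while loop: discard indices with arr[stack[-1]] >= arr[i]
def fnsPopB1 (arr : List Int) (i : Int) : List Int → List Int
  | [] => []
  | t :: rest =>
    if PySem.List.pyGetD arr t 0 ≥ PySem.List.pyGetD arr i 0 then fnsPopB1 arr i rest
    else t :: rest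

-- pass-2 while loop: pop and record right_res[idx] = i-1
def fnsPopB2 (arr : List Int) (i : Int) : List Int → PySem.Dict Int Int → List Int × PySem.Dict Int Int
  | [], right => ([], right)
  | t :: rest, right =>
    if PySem.List.pyGetD arr t 0 ≥ PySem.List.pyGetD arr i 0 then
      fnsPopB2 arr i rest (right.insert t (i - 1))
    else (t :: rest, right)

def fnsStepL (arr : List Int) (st : PySem.Dict Int Int × List Int) (i : Int) :
    PySem.Dict Int Int × List Int :=
  match st with
  | (left, stack) =>
    let stack := fnsPopB1 arr i stack
    (left.insert i (match stack with | [] => 0 | t :: _ => t + 1), i :: stack)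

def fnsStepR (arr : List Int) (st : PySem.Dict Int Int × List Int) (i : Int) :
    PySem.Dict Int Int × List Int :=
  match st with
  | (right, stack) =>
    match fnsPopB2 arr i stack right with
    | (stack, right) => (right, i :: stack)

def findNextSmaller_alt (arr : List Int) : (List (Int × Int)) × (List (Int × Int)) :=
  let n : Int := (arr.length : Int)
  let p1 := (PySem.List.pyRange 0 n 1).foldl (fnsStepL arr) (PySem.Dict.empty, [])
  let p2 := (PySem.List.pyRange 0 n 1).foldl (fnsStepR arr) (PySem.Dict.empty, [])
  let right := p2.2.foldl (fun r idx => r.insert idx (n - 1)) p2.1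
  (p1.1.items, right.items)

-- ===== PRECONDITION & SPEC =====
-- On the empty list A returns ({0: 0}, {0: -1}) because it unconditionally seeds index 0
-- before checking the length, while B returns ({}, {}), the intended answer since an empty
-- array has no element 0.
def D_findNextSmaller (arr : List Int) : Prop := arr.isEmpty = true
instance (arr : List Int) : Decidable (D_findNextSmaller arr) := by unfold D_findNextSmaller; infer_instance

def Spec_findNextSmaller (arr : List Int) (out : (List (Int × Int)) × (List (Int × Int))) : Prop :=
  ¬ D_findNextSmaller arr → out = findNextSmaller_alt arr
instance (arr : List Int) (out : (List (Int × Int)) × (List (Int × Int))) : Decidable (Spec_findNextSmaller arr out) := by unfold Spec_findNextSmaller; infer_instance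

def pvDiffWitness_findNextSmaller : List Int := []
def pvDiffWitnessOut_findNextSmaller :
    ((List (Int × Int)) × (List (Int × Int))) × ((List (Int × Int)) × (List (Int × Int))) :=
  (([(0, 0)], [(0, -1)]), ([], []))

-- ===== CLAIM (what is proved, stated in full; the proofs are below) =====
def Claim_unchanged_findNextSmaller : Prop := ∀ (arr : List Int), Dom_findNextSmaller arr → Spec_findNextSmaller arr (findNextSmaller arr)
def Claim_changed_findNextSmaller : Prop := Dom_findNextSmaller (pvDiffWitness_findNextSmaller) ∧ D_findNextSmaller (pvDiffWitness_findNextSmaller) ∧ findNextSmaller (pvDiffWitness_findNextSmaller) = pvDiffWitnessOut_findNextSmaller.1 ∧ findNextSmaller_alt (pvDiffWitness_findNextSmaller) = pvDiffWitnessOut_findNextSmaller.2 ∧ pvDiffWitnessOut_findNextSmaller.1 ≠ pvDiffWitnessOut_findNextSmaller.2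
def Claim_exact_findNextSmaller : Prop := ∀ (arr : List Int), Dom_findNextSmaller arr → D_findNextSmaller arr → findNextSmaller arr ≠ findNextSmaller_alt arr

-- ===== LEMMAS AND PROOFS =====

-- B's two pop loops are the two projections of A's pop loop
theorem fnsPopB2_eq_popA (arr : List Int) (i : Int) :
    ∀ (s : List Int) (r : PySem.Dict Int Int), fnsPopB2 arr i s r = fnsPopA arr i s r := by
  intro s
  induction s with
  | nil => intro r; rfl
  | cons t rest ih =>
    intro r
    simp only [fnsPopB2, fnsPopA]
    split_ifs with h
    · exact ih _
    · rfl

theorem fnsPopA_fst (arr : List Int) (i : Int) :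
    ∀ (s : List Int) (r : PySem.Dict Int Int), (fnsPopA arr i s r).1 = fnsPopB1 arr i s := by
  intro s
  induction s with
  | nil => intro r; rfl
  | cons t rest ih =>
    intro r
    simp only [fnsPopA, fnsPopB1]
    split_ifs with h
    · exact ih _
    · rfl

-- one step of A's interleaved loop is one step of each of B's two loops
theorem step_decomp (arr : List Int) (i : Int) (L R : PySem.Dict Int Int) (S : List Int) :
    fnsStepA arr (L, R, S) i = ((fnsStepL arr (L, S) i).1, fnsStepR arr (R, S) i) ∧
    (fnsStepL arr (L, S) i).2 = (fnsStepR arr (R, S) i).2 := by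
  simp only [fnsStepA, fnsStepL, fnsStepR, fnsPopB2_eq_popA]
  have h1 : (fnsPopA arr i S R).1 = fnsPopB1 arr i S := fnsPopA_fst arr i S R
  rcases hA : fnsPopA arr i S R with ⟨s', r'⟩
  rw [hA] at h1
  simp only at h1
  rw [← h1]
  cases s' <;> simp_all

-- A's fold over any index list is the pair of B's folds (stacks stay in lockstep)
theorem fold_decomp (arr : List Int) :
    ∀ (l : List Int) (L R : PySem.Dict Int Int) (S : List Int),
      l.foldl (fnsStepA arr) (L, R, S) =
        ((l.foldl (fnsStepL arr) (L, S)).1, l.foldl (fnsStepR arr) (R, S)) := by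
  intro l
  induction l with
  | nil => intro L R S; rfl
  | cons i rest ih =>
    intro L R S
    obtain ⟨h1, h2⟩ := step_decomp arr i L R S
    simp only [List.foldl_cons, h1]
    rcases hL : fnsStepL arr (L, S) i with ⟨L', SL⟩
    rcases hR : fnsStepR arr (R, S) i with ⟨R', SR⟩
    rw [hL, hR] at h2
    simp only at h2
    subst h2
    exact ih L' R' SL

-- after B's first iteration (i = 0 on empty state) the states match A's seeded init
theorem stepL_zero (arr : List Int) :
    fnsStepL arr (PySem.Dict.empty, []) 0 = (PySem.Dict.empty.insert 0 0, [0]) := rfl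
theorem stepR_zero (arr : List Int) :
    fnsStepR arr (PySem.Dict.empty, []) 0 = (PySem.Dict.empty, [0]) := rfl

-- ===== VERDICT (by name: the statement is the Claim_ definition above) =====
theorem findNextSmaller_spec : Claim_unchanged_findNextSmaller := by
  intro arr _ hD
  have hne : arr ≠ [] := fun h => hD (by simp [D_findNextSmaller, h])
  have hpos : (0 : Int) < (arr.length : Int) := by
    have := List.length_pos_iff.mpr hne
    exact_mod_cast this
  simp only [findNextSmaller, findNextSmaller_alt]
  rw [PySem.List.pyRange_one_cons hpos]
  rw [List.foldl_cons, List.foldl_cons, stepL_zero, stepR_zero,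
      fold_decomp arr (PySem.List.pyRange 1 (arr.length : Int) 1)
        (PySem.Dict.empty.insert 0 0) PySem.Dict.empty [0]]
  rcases hF : (PySem.List.pyRange 1 (arr.length : Int) 1).foldl (fnsStepR arr)
      (PySem.Dict.empty, [0]) with ⟨R', S'⟩
  simp only [zero_add, hF]

theorem findNextSmaller_changed : Claim_changed_findNextSmaller := by
  unfold Claim_changed_findNextSmaller; decide

theorem findNextSmaller_tight : Claim_exact_findNextSmaller := by
  intro arr _ hD
  have h : arr = [] := List.isEmpty_iff.mp hD
  subst h
  decide
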